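-- pv_equiv track=rewrite | github.com/olawale-kareem/Algorithm-challenges | random_algorithms/number_rearrange.py | number_rearrange
-- ===== SOURCE A (Python) =====
-- def number_rearrange(arr):
--     # this algorithm rearranges the odd numbers alone in a list
--     # seperate the odd numbers out and replace with a "#"
--     odd_numbers = []
--     copy_arr = arr.copy()
--     for number in arr:
--         if number % 2 == 1:
--             copy_arr[copy_arr.index(number)] = "#"
--             odd_numbers.append(number)
--
--
--     # sort the odd_numbers array
--     odd_numbers.sort()
--     # add to the sorted odd_num array to the other using index method
--     for num in odd_numbers:
--        copy_arr[ copy_arr.index("#") ] = num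
--
--     return copy_arr
-- ===== SOURCE B (Python) =====
-- def number_rearrange(arr):
--     odds = sorted(x for x in arr if x % 2 == 1)
--     it = iter(odds)
--     return [next(it) if x % 2 == 1 else x for x in arr]
-- ===== Notes on version B (the rewrite author's own statement) =====
-- stated objective: alternative
-- what changed: Replaces A's mark-with-'#'-sentinels plus repeated list.index scans (two passes with an inner linear scan each) by sorting the odd values once and rebuilding the list in a single pass that consumes the sorted odds from an iterator.
import Mathlib
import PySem

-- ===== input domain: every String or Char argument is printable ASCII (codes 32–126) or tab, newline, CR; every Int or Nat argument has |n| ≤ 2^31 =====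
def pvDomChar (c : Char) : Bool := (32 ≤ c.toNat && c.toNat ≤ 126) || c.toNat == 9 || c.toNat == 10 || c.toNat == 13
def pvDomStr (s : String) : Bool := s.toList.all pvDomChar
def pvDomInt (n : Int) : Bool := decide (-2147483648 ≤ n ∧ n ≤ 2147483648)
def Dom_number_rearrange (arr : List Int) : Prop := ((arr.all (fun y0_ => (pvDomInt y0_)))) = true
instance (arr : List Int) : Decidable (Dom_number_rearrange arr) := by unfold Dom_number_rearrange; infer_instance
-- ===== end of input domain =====

-- B replaces A's '#'-sentinel marking and repeated list.index scans by one sort of the odd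
-- values and a single reconstruction pass consuming them in order.


-- shared parity test: Python's `x % 2 == 1` (floor mod, so true for negative odds too)
def nrOdd (x : Int) : Bool := PySem.Int.mod x 2 == 1

-- ===== PORT A =====
-- copy_arr holds Int-or-"#": Option Int, `none` standing for "#".
-- one iteration of the marking loop (the `index` ValueError branch is unreachable: `number` was read from arr)
def nrMarkStep (st : List (Option Int) × List Int) (number : Int) : List (Option Int) × List Int :=
  if nrOdd number then
    match PySem.List.index? st.1 (some number) with
    | some i => (st.1.set i none, st.2 ++ [number])
    | none => (st.1, st.2 ++ [number])
  else st

-- one iteration of the filling loop (the `index` ValueError branch is unreachable: as many "#" as odds)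
def nrFillStep (c : List (Option Int)) (num : Int) : List (Option Int) :=
  match PySem.List.index? c none with
  | some i => c.set i (some num)
  | none => c

def number_rearrange (arr : List Int) : List Int :=
  let st := arr.foldl nrMarkStep (arr.map some, [])
  let odds := PySem.List.sorted st.2 id false
  let copy := odds.foldl nrFillStep st.1
  -- Python returns copy_arr, now an all-int list again; `.getD 0` is only the type coercion (no none remains)
  copy.map (fun o => o.getD 0)

-- ===== PORT B =====
-- the comprehension: walk arr once, consuming the sorted odds where the element is odd
-- (the exhausted-iterator branch is unreachable: the odds list has exactly one entry per odd element)
def nrTake (arr : List Int) (odds : List Int) : List Int :=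
  match arr with
  | [] => []
  | x :: xs =>
    if nrOdd x then
      match odds with
      | o :: os => o :: nrTake xs os
      | [] => x :: nrTake xs []
    else x :: nrTake xs odds

def number_rearrange_alt (arr : List Int) : List Int :=
  nrTake arr (PySem.List.sorted (arr.filter nrOdd) id false)

-- ===== PRECONDITION & SPEC =====
def Spec_number_rearrange (arr : List Int) (out : List Int) : Prop := out = number_rearrange_alt arr
instance (arr : List Int) (out : List Int) : Decidable (Spec_number_rearrange arr out) := by unfold Spec_number_rearrange; infer_instance

-- ===== CLAIM (what is proved, stated in full; the proofs are below) =====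
def Claim_equal_number_rearrange : Prop := ∀ (arr : List Int), Dom_number_rearrange arr → Spec_number_rearrange arr (number_rearrange arr)

-- ===== LEMMAS AND PROOFS =====

-- proof-only: the shape of copy_arr after marking a processed prefix
def nrMask (x : Int) : Option Int := if nrOdd x then none else some x

-- index of v in a list none of whose prefix elements equal v: skip the prefix
theorem nrIndex_append (pre l : List (Option Int)) (v : Option Int) (h : v ∉ pre) :
    PySem.List.index? (pre ++ l) v = (PySem.List.index? l v).map (· + pre.length) := by
  induction pre with
  | nil => simp [Option.map_id']
  | cons p ps ih =>
    have hpv : p ≠ v := fun he => h (he ▸ List.mem_cons_self ..)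
    rw [List.cons_append, PySem.List.index?_cons_of_ne _ hpv,
      ih (fun hm => h (List.mem_cons_of_mem _ hm)), Option.map_map]
    rcases PySem.List.index? l v with _ | i <;> simp

theorem nrMark_invariant (s p : List Int) :
    s.foldl nrMarkStep (p.map nrMask ++ s.map some, p.filter nrOdd)
      = ((p ++ s).map nrMask, (p ++ s).filter nrOdd) := by
  induction s generalizing p with
  | nil => simp
  | cons v s' ih =>
    have step : nrMarkStep (p.map nrMask ++ (v :: s').map some, p.filter nrOdd) v
        = ((p ++ [v]).map nrMask ++ s'.map some, (p ++ [v]).filter nrOdd) := by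
      by_cases hv : nrOdd v
      · have hnot : some v ∉ p.map nrMask := by
          intro hmem
          rcases List.mem_map.mp hmem with ⟨y, _, hy⟩
          by_cases h2 : nrOdd y
          · simp [nrMask, h2] at hy
          · simp [nrMask, h2] at hy
            exact h2 (hy ▸ hv)
        have hidx : PySem.List.index? (p.map nrMask ++ some v :: s'.map some) (some v)
            = some (p.map nrMask).length := by
          rw [nrIndex_append _ _ _ hnot, PySem.List.index?_cons_self]
          simp
        simp only [nrMarkStep, hv, if_true, List.map_cons, hidx]
        rw [List.set_append]
        simp [nrMask, hv]
      · simp only [nrMarkStep, hv, Bool.false_eq_true, if_false]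
        simp [nrMask, hv]
    rw [List.foldl_cons, step, ih (p ++ [v])]
    simp

theorem nrFill_cons_some (a : Int) (c : List (Option Int)) (odds : List Int) :
    odds.foldl nrFillStep (some a :: c) = some a :: odds.foldl nrFillStep c := by
  induction odds generalizing c with
  | nil => rfl
  | cons o os ih =>
    have : nrFillStep (some a :: c) o = some a :: nrFillStep c o := by
      unfold nrFillStep
      rw [PySem.List.index?_cons_of_ne _ (by simp)]
      cases h : PySem.List.index? c none with
      | none => simp
      | some i => simp
    rw [List.foldl_cons, this, List.foldl_cons, ih]

theorem nrFill_take (l : List Int) (odds : List Int)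
    (h : odds.length = (l.filter nrOdd).length) :
    (odds.foldl nrFillStep (l.map nrMask)).map (fun o => o.getD 0) = nrTake l odds := by
  induction l generalizing odds with
  | nil =>
    have : odds = [] := List.eq_nil_of_length_eq_zero (by simpa using h)
    subst this; rfl
  | cons x xs ih =>
    by_cases hx : nrOdd x
    · have hmask : nrMask x = none := by simp [nrMask, hx]
      rcases odds with _ | ⟨o, os⟩
      · exfalso; simp [hx] at h
      · have hstep : nrFillStep (none :: xs.map nrMask) o = some o :: xs.map nrMask := by
          unfold nrFillStep
          rw [PySem.List.index?_cons_self]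
          rfl
        simp only [List.map_cons, hmask, List.foldl_cons, hstep, nrFill_cons_some]
        have hlen : os.length = (xs.filter nrOdd).length := by
          simpa [List.filter_cons, hx] using h
        simp [nrTake, hx, ih os hlen]
    · have hmask : nrMask x = some x := by simp [nrMask, hx]
      have hlen : odds.length = (xs.filter nrOdd).length := by
        simpa [List.filter_cons, hx] using h
      simp only [List.map_cons, hmask, nrFill_cons_some]
      simp [nrTake, hx, ih odds hlen]

-- ===== VERDICT (by name: the statement is the Claim_ definition above) =====
theorem number_rearrange_spec : Claim_equal_number_rearrange := by
  intro arr _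
  unfold Spec_number_rearrange number_rearrange number_rearrange_alt
  have hmark := nrMark_invariant arr []
  simp only [List.map_nil, List.nil_append, List.filter_nil] at hmark
  rw [hmark]
  exact nrFill_take arr _ (by simp [PySem.List.length_sorted])
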